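-- pv_equiv track=rewrite | github.com/ctmansfield/mother | mother/app/nerdle/logic.py | tiles_from_guess
-- ===== SOURCE A (Python) =====
-- from typing import Dict, List, Optional, Tuple
--
-- def tiles_from_guess(guess: str, target: str) -> List[str]:
--     G, Y, B = "G", "Y", "B"
--     res = [B] * len(guess)
--     t_counts: Dict[str, int] = {}
--     for i, (g, t) in enumerate(zip(guess, target)):
--         if g == t:
--             res[i] = G
--         else:
--             t_counts[t] = t_counts.get(t, 0) + 1
--     for i, (g, t) in enumerate(zip(guess, target)):
--         if res[i] == G:
--             continue
--         if t_counts.get(g, 0) > 0: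
--             res[i] = Y
--             t_counts[g] -= 1
--     return res
-- ===== SOURCE B (Python) =====
-- from typing import List
--
-- def tiles_from_guess(guess: str, target: str) -> List[str]:
--     n = min(len(guess), len(target))
--     # positions (within the zipped prefix) where guess and target disagree
--     mism = [i for i in range(n) if guess[i] != target[i]]
--     # yellow quota per letter: how often it occurs in target at mismatched positions
--     quota = {}
--     for i in mism:
--         quota[target[i]] = quota.get(target[i], 0) + 1
--
--     def tile(i: int) -> str:
--         if i >= n:
--             return "B"
--         if guess[i] == target[i]:
--             return "G"
--         rank = sum(1 for j in mism if j < i and guess[j] == guess[i])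
--         return "Y" if rank < quota.get(guess[i], 0) else "B"
--
--     return [tile(i) for i in range(len(guess))]
-- ===== Notes on version B (the rewrite author's own statement) =====
-- stated objective: alternative
-- what changed: Replaces A's stateful two-pass scan with a mutable counter dict by a pure per-position classification: each tile is computed independently from a closed-form rank-vs-quota comparison over a precomputed list of mismatched positions.
import Mathlib
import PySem

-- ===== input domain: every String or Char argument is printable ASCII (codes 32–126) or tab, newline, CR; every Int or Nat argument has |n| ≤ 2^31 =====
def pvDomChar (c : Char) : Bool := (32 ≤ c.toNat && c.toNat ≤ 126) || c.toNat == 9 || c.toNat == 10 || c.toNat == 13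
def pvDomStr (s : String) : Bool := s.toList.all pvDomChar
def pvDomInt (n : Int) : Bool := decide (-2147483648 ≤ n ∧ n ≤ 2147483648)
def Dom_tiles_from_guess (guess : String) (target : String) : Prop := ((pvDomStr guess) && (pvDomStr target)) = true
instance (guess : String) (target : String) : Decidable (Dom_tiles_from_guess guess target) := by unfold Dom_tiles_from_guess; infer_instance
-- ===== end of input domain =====

-- B replaces A's stateful two-pass scan (mutable counter dict) by a pure per-position
-- rank-vs-quota classification over precomputed mismatch positions (alternative decomposition).


-- ===== PORT A =====
-- first loop of A: walk the zipped pairs with index i, mark greens, count mismatched target chars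
def aLoop1 : List (Char × Char) → Nat → List String → PySem.Dict Char Int → List String × PySem.Dict Char Int
  | [], _, res, tc => (res, tc)
  | (g, t) :: ps, i, res, tc =>
    if g = t then aLoop1 ps (i + 1) (res.set i "G") tc
    else aLoop1 ps (i + 1) res (tc.insert t (tc.getD t 0 + 1))

-- second loop of A: assign yellows while decrementing the counter dict
def aLoop2 : List (Char × Char) → Nat → List String → PySem.Dict Char Int → List String
  | [], _, res, _ => res
  | (g, _) :: ps, i, res, tc =>
    if res.getD i "B" = "G" then aLoop2 ps (i + 1) res tc
    else if tc.getD g 0 > 0 then aLoop2 ps (i + 1) (res.set i "Y") (tc.insert g (tc.getD g 0 - 1))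
    else aLoop2 ps (i + 1) res tc

def tiles_from_guess (guess : String) (target : String) : List String :=
  let pairs := guess.toList.zip target.toList
  let st := aLoop1 pairs 0 (List.replicate guess.toList.length "B") PySem.Dict.empty
  aLoop2 pairs 0 st.1 st.2

-- ===== PORT B =====
def tiles_from_guess_alt (guess : String) (target : String) : List String :=
  let gl := guess.toList
  let tl := target.toList
  let n := min gl.length tl.length
  let mism := (List.range n).filter (fun i => !(gl.getD i ' ' == tl.getD i ' '))
  let quota : PySem.Dict Char Int :=
    mism.foldl (fun d i => d.insert (tl.getD i ' ') (d.getD (tl.getD i ' ') 0 + 1)) PySem.Dict.empty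
  (List.range gl.length).map (fun i =>
    if n ≤ i then "B"
    else if gl.getD i ' ' == tl.getD i ' ' then "G"
    else if ((mism.filter (fun j => decide (j < i) && (gl.getD j ' ' == gl.getD i ' '))).length : Int)
              < quota.getD (gl.getD i ' ') 0 then "Y"
    else "B")

-- ===== PRECONDITION & SPEC =====
def Spec_tiles_from_guess (guess : String) (target : String) (out : List String) : Prop := out = tiles_from_guess_alt guess target
instance (guess : String) (target : String) (out : List String) : Decidable (Spec_tiles_from_guess guess target out) := by unfold Spec_tiles_from_guess; infer_instance

-- ===== CLAIM (what is proved, stated in full; the proofs are below) =====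
def Claim_equal_tiles_from_guess : Prop := ∀ (guess : String) (target : String), Dom_tiles_from_guess guess target → Spec_tiles_from_guess guess target (tiles_from_guess guess target)

-- ===== LEMMAS AND PROOFS =====

-- proof-side vocabulary: per-char yellow quota, mismatch-rank before an index, the final tile value
def quotaCnt (pairs : List (Char × Char)) (c : Char) : Nat :=
  pairs.countP (fun p => !(p.1 == p.2) && (p.2 == c))

def mcnt (pairs : List (Char × Char)) (k : Nat) (c : Char) : Nat :=
  (pairs.take k).countP (fun p => !(p.1 == p.2) && (p.1 == c))

def gTile (pairs : List (Char × Char)) (j : Nat) : String :=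
  if j < pairs.length ∧ (pairs.getD j (' ', ' ')).1 = (pairs.getD j (' ', ' ')).2 then "G" else "B"

def fTile (pairs : List (Char × Char)) (j : Nat) : String :=
  if j < pairs.length then
    if (pairs.getD j (' ', ' ')).1 = (pairs.getD j (' ', ' ')).2 then "G"
    else if mcnt pairs j (pairs.getD j (' ', ' ')).1 < quotaCnt pairs (pairs.getD j (' ', ' ')).1 then "Y"
    else "B"
  else "B"
theorem aLoop1_len (ps : List (Char × Char)) (i : Nat) (res : List String) (tc : PySem.Dict Char Int) :
    (aLoop1 ps i res tc).1.length = res.length := by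
  induction ps generalizing i res tc with
  | nil => simp [aLoop1]
  | cons p ps ih =>
    obtain ⟨g, t⟩ := p
    simp only [aLoop1]
    split_ifs <;> simp [ih]

theorem aLoop1_tc (ps : List (Char × Char)) (i : Nat) (res : List String) (tc : PySem.Dict Char Int) (c : Char) :
    (aLoop1 ps i res tc).2.getD c 0 = tc.getD c 0 + (quotaCnt ps c : Int) := by
  induction ps generalizing i res tc with
  | nil => simp [aLoop1, quotaCnt]
  | cons p ps ih =>
    obtain ⟨g, t⟩ := p
    by_cases hgt : g = t
    · rw [show aLoop1 ((g,t)::ps) i res tc = aLoop1 ps (i+1) (res.set i "G") tc by simp [aLoop1, hgt]]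
      rw [ih]
      simp [quotaCnt, List.countP_cons, hgt]
    · rw [show aLoop1 ((g,t)::ps) i res tc = aLoop1 ps (i+1) res (tc.insert t (tc.getD t 0 + 1)) by simp [aLoop1, hgt]]
      rw [ih, PySem.Dict.getD_insert]
      simp only [quotaCnt, List.countP_cons]
      by_cases hc : c = t
      · subst hc
        simp only [if_pos rfl]
        simp [hgt, bne_iff_ne]
        push_cast; ring
      · rw [if_neg hc]
        have : ((t == c) = false) := by simp [Ne.symm hc]
        simp [this]

theorem aLoop1_res (ps : List (Char × Char)) (i : Nat) (res : List String) (tc : PySem.Dict Char Int)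
    (h : i + ps.length ≤ res.length) (j : Nat) :
    (aLoop1 ps i res tc).1.getD j "B" =
      if i ≤ j ∧ j < i + ps.length ∧ (ps.getD (j - i) (' ', ' ')).1 = (ps.getD (j - i) (' ', ' ')).2
      then "G" else res.getD j "B" := by
  induction ps generalizing i res tc with
  | nil => simp [aLoop1]
  | cons p ps ih =>
    obtain ⟨g, t⟩ := p
    simp only [List.length_cons] at h
    by_cases hgt : g = t
    · rw [show aLoop1 ((g,t)::ps) i res tc = aLoop1 ps (i+1) (res.set i "G") tc by simp [aLoop1, hgt]]
      rw [ih _ _ _ (by simpa [List.length_set] using (by omega : i + 1 + ps.length ≤ res.length))]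
      by_cases hj : j = i
      · have h1 : ¬ (i + 1 ≤ j) := by omega
        rw [hj]
        simp [h1, hj, hgt, List.getD_eq_getElem?_getD, List.getElem?_set_self, (by omega : i < res.length)]
      · have : (res.set i "G").getD j "B" = res.getD j "B" := by
          simp [List.getD_eq_getElem?_getD, List.getElem?_set_ne (by omega : i ≠ j)]
        rw [this]
        by_cases h2 : i + 1 ≤ j
        · have hsub : j - i = (j - (i+1)) + 1 := by omega
          simp only [hsub, List.getD_cons_succ, List.length_cons]
          congr 1
          simp only [eq_iff_iff]
          constructor
          · rintro ⟨_, h4, h5⟩; exact ⟨by omega, by omega, h5⟩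
          · rintro ⟨_, h4, h5⟩; exact ⟨by omega, by omega, h5⟩
        · have h3 : ¬ (i ≤ j) := by omega
          simp [h2, h3]
    · rw [show aLoop1 ((g,t)::ps) i res tc = aLoop1 ps (i+1) res (tc.insert t (tc.getD t 0 + 1)) by simp [aLoop1, hgt]]
      rw [ih _ _ _ (by omega)]
      by_cases hj : j = i
      · have h1 : ¬ (i + 1 ≤ j) := by omega
        simp [h1, hj, hgt]
      · by_cases h2 : i + 1 ≤ j
        · have hsub : j - i = (j - (i+1)) + 1 := by omega
          simp only [hsub, List.getD_cons_succ, List.length_cons]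
          congr 1
          simp only [eq_iff_iff]
          constructor
          · rintro ⟨_, h4, h5⟩; exact ⟨by omega, by omega, h5⟩
          · rintro ⟨_, h4, h5⟩; exact ⟨by omega, by omega, h5⟩
        · have h3 : ¬ (i ≤ j) := by omega
          simp [h2, h3]

theorem aLoop2_len (ps : List (Char × Char)) (i : Nat) (res : List String) (tc : PySem.Dict Char Int) :
    (aLoop2 ps i res tc).length = res.length := by
  induction ps generalizing i res tc with
  | nil => simp [aLoop2]
  | cons p ps ih =>
    obtain ⟨g, t⟩ := p
    simp only [aLoop2]
    split_ifs <;> simp [ih]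

theorem getD_set_ne (l : List String) (i j : Nat) (v : String) (h : i ≠ j) :
    (l.set i v).getD j "B" = l.getD j "B" := by
  simp [List.getD_eq_getElem?_getD, List.getElem?_set_ne h]

theorem getD_set_self (l : List String) (i : Nat) (v : String) (h : i < l.length) :
    (l.set i v).getD i "B" = v := by
  simp [List.getD_eq_getElem?_getD, List.getElem?_set_self, h]

theorem mcnt_succ (pairs : List (Char × Char)) (i : Nat) (hi : i < pairs.length) (c : Char) :
    mcnt pairs (i + 1) c = mcnt pairs i c +
      (if !((pairs.getD i (' ', ' ')).1 == (pairs.getD i (' ', ' ')).2) && ((pairs.getD i (' ', ' ')).1 == c)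
       then 1 else 0) := by
  unfold mcnt
  rw [List.take_succ, List.countP_append]
  congr 1
  simp [List.getElem?_eq_getElem hi, List.getD_eq_getElem?_getD, List.countP_cons]

theorem aLoop2_res (pairs : List (Char × Char)) (ps : List (Char × Char)) (i : Nat)
    (res : List String) (tc : PySem.Dict Char Int)
    (hps : pairs.drop i = ps)
    (hlen : pairs.length ≤ res.length)
    (hlt : ∀ j, j < i → res.getD j "B" = fTile pairs j)
    (hge : ∀ j, i ≤ j → res.getD j "B" = gTile pairs j)
    (htc : ∀ c, tc.getD c 0 = ((quotaCnt pairs c - mcnt pairs i c : Nat) : Int)) (j : Nat) :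
    (aLoop2 ps i res tc).getD j "B" =
      if j < pairs.length then fTile pairs j else res.getD j "B" := by
  induction ps generalizing i res tc with
  | nil =>
    have hli : pairs.length ≤ i := by
      rw [← List.drop_eq_nil_iff]; exact hps
    simp only [aLoop2]
    split_ifs with hj
    · exact hlt j (by omega)
    · rfl
  | cons p ps ih =>
    obtain ⟨g, t⟩ := p
    have hi : i < pairs.length := by
      by_contra hc
      rw [List.drop_eq_nil_of_le (by omega)] at hps
      simp at hps
    have hget : pairs.getD i (' ', ' ') = (g, t) := by
      rw [List.getD_eq_getElem _ _ hi]
      have h0 : (pairs.drop i)[0]'(by rw [hps]; simp) = (g, t) := by simp [hps]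
      rw [List.getElem_drop] at h0
      simpa using h0
    have hdrop : pairs.drop (i + 1) = ps := by
      have := congrArg List.tail hps
      simpa [List.tail_drop] using this
    have hresi : res.getD i "B" = gTile pairs i := hge i le_rfl
    by_cases hmatch : g = t
    · -- green position: skip
      have hG : res.getD i "B" = "G" := by
        rw [hresi]; unfold gTile; rw [if_pos ⟨hi, by rw [hget]; exact hmatch⟩]
      rw [show aLoop2 ((g, t) :: ps) i res tc = aLoop2 ps (i + 1) res tc by
        simp only [aLoop2]; rw [if_pos hG]]
      refine ih (i + 1) res tc hdrop hlen ?_ ?_ ?_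
      · intro j hj
        rcases Nat.lt_succ_iff_lt_or_eq.mp hj with h | h
        · exact hlt j h
        · rw [h, hG]
          unfold fTile
          rw [if_pos hi, if_pos (by rw [hget]; exact hmatch)]
      · intro j hj
        exact hge j (by omega)
      · intro c
        rw [htc c, mcnt_succ pairs i hi c, hget]
        simp [hmatch]
    · -- mismatch position
      have hB : res.getD i "B" = "B" := by
        rw [hresi]; unfold gTile
        rw [if_neg]
        rintro ⟨-, hm⟩
        rw [hget] at hm
        exact hmatch hm
      have hnotG : ¬ (res.getD i "B" = "G") := by rw [hB]; decide
      have hmc : mcnt pairs (i + 1) g = mcnt pairs i g + 1 := by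
        rw [mcnt_succ pairs i hi g, hget]
        simp [hmatch]
      have hmcne : ∀ c, c ≠ g → mcnt pairs (i + 1) c = mcnt pairs i c := by
        intro c hc
        rw [mcnt_succ pairs i hi c, hget]
        simp [Ne.symm hc]
      by_cases hpos : tc.getD g 0 > 0
      · -- assign yellow
        have hlt' : mcnt pairs i g < quotaCnt pairs g := by
          have := htc g
          rw [this] at hpos
          omega
        rw [show aLoop2 ((g, t) :: ps) i res tc =
              aLoop2 ps (i + 1) (res.set i "Y") (tc.insert g (tc.getD g 0 - 1)) by
          simp only [aLoop2]
          rw [if_neg hnotG, if_pos hpos]]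
        have hres := ih (i + 1) (res.set i "Y") (tc.insert g (tc.getD g 0 - 1)) hdrop
          (by simpa using hlen)
          (by
            intro j hj
            rcases Nat.lt_succ_iff_lt_or_eq.mp hj with h | h
            · rw [getD_set_ne _ _ _ _ (by omega)]
              exact hlt j h
            · rw [h, getD_set_self _ _ _ (by omega)]
              unfold fTile
              rw [if_pos hi, if_neg (by rw [hget]; exact hmatch), if_pos (by rw [hget]; exact hlt')]
          )
          (by
            intro j hj
            rw [getD_set_ne _ _ _ _ (by omega)]
            exact hge j (by omega)
          )
          (by
            intro c
            rw [PySem.Dict.getD_insert]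
            by_cases hc : c = g
            · subst hc
              rw [if_pos rfl, htc c, hmc]
              omega
            · rw [if_neg hc, htc c, hmcne c hc]
          )
        rw [hres]
        split_ifs with h1
        · rfl
        · rw [getD_set_ne _ _ _ _ (by omega)]
      · -- quota exhausted: stays B
        have hge' : quotaCnt pairs g ≤ mcnt pairs i g := by
          have := htc g
          rw [this] at hpos
          omega
        rw [show aLoop2 ((g, t) :: ps) i res tc = aLoop2 ps (i + 1) res tc by
          simp only [aLoop2]
          rw [if_neg hnotG, if_neg hpos]]
        refine ih (i + 1) res tc hdrop hlen ?_ ?_ ?_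
        · intro j hj
          rcases Nat.lt_succ_iff_lt_or_eq.mp hj with h | h
          · exact hlt j h
          · rw [h, hB]
            unfold fTile
            rw [if_pos hi, if_neg (by rw [hget]; exact hmatch),
              if_neg (by rw [hget]; show ¬(mcnt pairs i g < quotaCnt pairs g); omega)]
        · intro j hj
          exact hge j (by omega)
        · intro c
          rw [htc c]
          by_cases hc : c = g
          · subst hc
            rw [hmc]
            omega
          · rw [hmcne c hc]

theorem fTile_of_ge (pairs : List (Char × Char)) (j : Nat) (h : pairs.length ≤ j) :
    fTile pairs j = "B" := by
  unfold fTile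
  rw [if_neg (by omega)]

theorem gTile_of_ge (pairs : List (Char × Char)) (j : Nat) (h : pairs.length ≤ j) :
    gTile pairs j = "B" := by
  unfold gTile
  rw [if_neg (by rintro ⟨h1, -⟩; omega)]

theorem portA_eq_spec (guess target : String) :
    tiles_from_guess guess target =
      (List.range guess.toList.length).map (fTile (guess.toList.zip target.toList)) := by
  have hplen : (guess.toList.zip target.toList).length ≤ guess.toList.length := by
    simp [List.length_zip]
  rw [show tiles_from_guess guess target =
        aLoop2 (guess.toList.zip target.toList) 0
          (aLoop1 (guess.toList.zip target.toList) 0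
            (List.replicate guess.toList.length "B") PySem.Dict.empty).1
          (aLoop1 (guess.toList.zip target.toList) 0
            (List.replicate guess.toList.length "B") PySem.Dict.empty).2 from rfl]
  have hlen1 : (aLoop1 (guess.toList.zip target.toList) 0
      (List.replicate guess.toList.length "B") PySem.Dict.empty).1.length = guess.toList.length := by
    rw [aLoop1_len]; simp
  have hres1 : ∀ j, (aLoop1 (guess.toList.zip target.toList) 0
      (List.replicate guess.toList.length "B") PySem.Dict.empty).1.getD j "B" =
      gTile (guess.toList.zip target.toList) j := by
    intro j
    rw [aLoop1_res _ _ _ _ (by simpa using hplen) j]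
    unfold gTile
    simp only [Nat.zero_add, Nat.sub_zero, Nat.zero_le, true_and]
    split_ifs <;> simp
  have htc1 : ∀ c, (aLoop1 (guess.toList.zip target.toList) 0
      (List.replicate guess.toList.length "B") PySem.Dict.empty).2.getD c 0 =
      ((quotaCnt (guess.toList.zip target.toList) c -
        mcnt (guess.toList.zip target.toList) 0 c : Nat) : Int) := by
    intro c
    rw [aLoop1_tc]
    simp [mcnt, PySem.Dict.getD_empty]
  have hfin := aLoop2_res (guess.toList.zip target.toList) (guess.toList.zip target.toList) 0 _ _
    rfl (by rw [hlen1]; exact hplen) (by intro j hj; omega) (fun j _ => hres1 j) htc1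
  apply List.ext_getElem
  · rw [aLoop2_len, hlen1]; simp
  · intro j hj hj2
    have hjL : j < guess.toList.length := by simpa using hj2
    rw [← List.getD_eq_getElem _ "B" hj, hfin j]
    rw [List.getElem_map, List.getElem_range]
    split_ifs with h1
    · rfl
    · rw [hres1 j, gTile_of_ge _ _ (by omega), fTile_of_ge _ _ (by omega)]

theorem map_getD_range (l : List (Char × Char)) (d : Char × Char) :
    (List.range l.length).map (fun j => l.getD j d) = l := by
  apply List.ext_getElem
  · simp
  · intro i h1 h2
    simp [List.getElem?_eq_getElem h2]

theorem countP_pairs (pairs : List (Char × Char)) (d : Char × Char) (p : Char × Char → Bool) :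
    pairs.countP p = (List.range pairs.length).countP (fun j => p (pairs.getD j d)) := by
  conv_lhs => rw [← map_getD_range pairs d]
  rw [List.countP_map]
  rfl

theorem countP_congr' (p q : Nat → Bool) (l : List Nat) (h : ∀ a ∈ l, p a = q a) :
    l.countP p = l.countP q := by
  simp only [List.countP_eq_length_filter]
  rw [List.filter_congr h]

theorem take_getD (l : List (Char × Char)) (i j : Nat) (h : j < i) (hi : i ≤ l.length) (d : Char × Char) :
    (l.take i).getD j d = l.getD j d := by
  rw [List.getD_eq_getElem _ _ (by rw [List.length_take]; omega),
      List.getD_eq_getElem _ _ (by omega)]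
  simp

theorem zip_getD (gl tl : List Char) (j : Nat) (h : j < min gl.length tl.length) :
    (gl.zip tl).getD j (' ', ' ') = (gl.getD j ' ', tl.getD j ' ') := by
  rw [List.getD_eq_getElem _ _ (by rw [List.length_zip]; omega)]
  rw [List.getElem_zip]
  rw [List.getD_eq_getElem _ _ (by omega), List.getD_eq_getElem _ _ (by omega)]

theorem fTile_green (pairs : List (Char × Char)) (i : Nat) (h : i < pairs.length)
    (hm : (pairs.getD i (' ', ' ')).1 = (pairs.getD i (' ', ' ')).2) : fTile pairs i = "G" := by
  unfold fTile
  rw [if_pos h, if_pos hm]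

theorem fTile_yellow (pairs : List (Char × Char)) (i : Nat) (h : i < pairs.length)
    (hm : ¬ (pairs.getD i (' ', ' ')).1 = (pairs.getD i (' ', ' ')).2)
    (hq : mcnt pairs i (pairs.getD i (' ', ' ')).1 < quotaCnt pairs (pairs.getD i (' ', ' ')).1) :
    fTile pairs i = "Y" := by
  unfold fTile
  rw [if_pos h, if_neg hm, if_pos hq]

theorem fTile_gray (pairs : List (Char × Char)) (i : Nat) (h : i < pairs.length)
    (hm : ¬ (pairs.getD i (' ', ' ')).1 = (pairs.getD i (' ', ' ')).2)
    (hq : ¬ mcnt pairs i (pairs.getD i (' ', ' ')).1 < quotaCnt pairs (pairs.getD i (' ', ' ')).1) :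
    fTile pairs i = "B" := by
  unfold fTile
  rw [if_pos h, if_neg hm, if_neg hq]

theorem quota_eval (gl tl : List Char) (c : Char) :
    ((((List.range (min gl.length tl.length)).filter
        (fun i => !(gl.getD i ' ' == tl.getD i ' '))).foldl
        (fun d i => d.insert (tl.getD i ' ') (d.getD (tl.getD i ' ') 0 + 1))
        PySem.Dict.empty).getD c 0) = (quotaCnt (gl.zip tl) c : Int) := by
  rw [← List.foldl_map (f := fun i => tl.getD i ' ')
        (g := fun (d : PySem.Dict Char Int) x => d.insert x (d.getD x 0 + 1))]
  rw [PySem.Dict.getD_foldl_insert_add_one, PySem.Dict.getD_empty]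
  rw [List.count_eq_countP, List.countP_map, List.countP_filter]
  rw [quotaCnt, countP_pairs (gl.zip tl) (' ', ' '), List.length_zip]
  rw [zero_add, Nat.cast_inj]
  apply countP_congr'
  intro j hj
  rw [List.mem_range] at hj
  rw [zip_getD gl tl j hj]
  simp only [Function.comp]
  rw [Bool.and_comm]

theorem rank_eval (gl tl : List Char) (i : Nat) (hi : i < min gl.length tl.length) (c : Char) :
    ((((List.range (min gl.length tl.length)).filter
        (fun j => !(gl.getD j ' ' == tl.getD j ' '))).filter
        (fun j => decide (j < i) && (gl.getD j ' ' == c))).length) = mcnt (gl.zip tl) i c := by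
  rw [← List.countP_eq_length_filter, List.countP_filter]
  rw [show min gl.length tl.length = i + (min gl.length tl.length - i) by omega,
      List.range_add, List.countP_append]
  have h2 : ((List.range (min gl.length tl.length - i)).map (i + ·)).countP
      (fun j => (decide (j < i) && (gl.getD j ' ' == c)) && !(gl.getD j ' ' == tl.getD j ' ')) = 0 := by
    rw [List.countP_eq_zero]
    intro a ha
    rw [List.mem_map] at ha
    obtain ⟨k, -, rfl⟩ := ha
    simp
  rw [h2, Nat.add_zero]
  rw [mcnt, countP_pairs ((gl.zip tl).take i) (' ', ' ')]
  have hlt : ((gl.zip tl).take i).length = i := by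
    rw [List.length_take, List.length_zip]; omega
  rw [hlt]
  apply countP_congr'
  intro j hj
  rw [List.mem_range] at hj
  rw [take_getD _ _ _ hj (by rw [List.length_zip]; omega), zip_getD gl tl j (by omega)]
  simp only [decide_eq_true (by omega : j < i)]
  simp [Bool.and_comm]

theorem portB_eq_spec (guess target : String) :
    tiles_from_guess_alt guess target =
      (List.range guess.toList.length).map (fTile (guess.toList.zip target.toList)) := by
  unfold tiles_from_guess_alt
  simp only []
  apply List.map_congr_left
  intro i hi
  rw [List.mem_range] at hi
  have hplen : (guess.toList.zip target.toList).length = min guess.toList.length target.toList.length :=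
    List.length_zip
  by_cases h1 : min guess.toList.length target.toList.length ≤ i
  · rw [if_pos h1, fTile_of_ge _ _ (by omega)]
  · rw [if_neg h1]
    have hin : i < min guess.toList.length target.toList.length := by omega
    have hzgi := zip_getD guess.toList target.toList i hin
    by_cases h2 : (guess.toList.getD i ' ' == target.toList.getD i ' ') = true
    · rw [if_pos h2, fTile_green _ _ (by omega) (by rw [hzgi]; exact (beq_iff_eq.mp h2))]
    · rw [if_neg h2]
      have hne : ¬ ((guess.toList.zip target.toList).getD i (' ', ' ')).1 =
          ((guess.toList.zip target.toList).getD i (' ', ' ')).2 := by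
        rw [hzgi]
        exact fun h => h2 (beq_iff_eq.mpr h)
      rw [quota_eval guess.toList target.toList, rank_eval guess.toList target.toList i hin]
      by_cases h3 : mcnt (guess.toList.zip target.toList) i (guess.toList.getD i ' ') <
          quotaCnt (guess.toList.zip target.toList) (guess.toList.getD i ' ')
      · rw [if_pos (by exact_mod_cast h3)]
        rw [fTile_yellow _ _ (by omega) hne (by rw [hzgi]; exact h3)]
      · rw [if_neg (by exact_mod_cast h3)]
        rw [fTile_gray _ _ (by omega) hne (by rw [hzgi]; exact h3)]

-- ===== VERDICT (by name: the statement is the Claim_ definition above) =====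
theorem tiles_from_guess_spec : Claim_equal_tiles_from_guess := by
  intro guess target _
  unfold Spec_tiles_from_guess
  rw [portA_eq_spec, portB_eq_spec]
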